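-- pv_equiv track=rewrite | github.com/Hoegh07/Project-Euler | Euler641/powerfree.py | solve
-- ===== SOURCE A (Python) =====
-- def powerful(P,N,p,prod,pos,s):
--     total = 0
--     for i in range(pos,len(P)):
--         prodd = prod*P[i]
--         c = N//(prodd**p)
--         if(c < 1):
--             break
--         total += c*s+powerful(P,N,p,prodd,i+1,s*(-1))
--     return total
--
-- def solve(P,N,p,prod,pos):
--     total = 0
--     for i in range(pos,len(P)):
--         prodd = prod*P[i]
--         c = N//(prodd**p)
--         if(c < 1):
--             break
--         total += (c-powerful(P,c,p,1,0,1))+solve(P,N,p,prodd,i+1)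
--     return total
-- ===== SOURCE B (Python) =====
-- def _nodes(P, M, p, prod, pos, sign):
--     """List of (product, sign) for every node of A's pruned subset tree
--     rooted at (prod, pos), in visiting order, with alternating signs."""
--     out = []
--     for i in range(pos, len(P)):
--         d = prod * P[i]
--         if M // (d ** p) < 1:
--             break
--         out.append((d, sign))
--         out.extend(_nodes(P, M, p, d, i + 1, -sign))
--     return out
--
--
-- def solve(P, N, p, prod, pos):
--     total = 0
--     for d, _ in _nodes(P, N, p, prod, pos, 1):
--         c = N // (d ** p)
--         inner = _nodes(P, c, p, 1, 0, 1)
--         total += c - sum(s * (c // (e ** p)) for e, s in inner)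
--     return total
-- ===== Notes on version B (the rewrite author's own statement) =====
-- stated objective: alternative
-- what changed: Replaces A's two interleaved summing recursions (solve/powerful) by a single list-producing enumerator of the reached (product, sign) nodes and two flat summations over that table.
-- outside the precondition, e.g. on solve([5, 0], 0, 2, 1, 0): A returns 0, B returns 0; on solve([2], 100, -1, 1, 0): A returns -200.0, B returns -200.0
import Mathlib
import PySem

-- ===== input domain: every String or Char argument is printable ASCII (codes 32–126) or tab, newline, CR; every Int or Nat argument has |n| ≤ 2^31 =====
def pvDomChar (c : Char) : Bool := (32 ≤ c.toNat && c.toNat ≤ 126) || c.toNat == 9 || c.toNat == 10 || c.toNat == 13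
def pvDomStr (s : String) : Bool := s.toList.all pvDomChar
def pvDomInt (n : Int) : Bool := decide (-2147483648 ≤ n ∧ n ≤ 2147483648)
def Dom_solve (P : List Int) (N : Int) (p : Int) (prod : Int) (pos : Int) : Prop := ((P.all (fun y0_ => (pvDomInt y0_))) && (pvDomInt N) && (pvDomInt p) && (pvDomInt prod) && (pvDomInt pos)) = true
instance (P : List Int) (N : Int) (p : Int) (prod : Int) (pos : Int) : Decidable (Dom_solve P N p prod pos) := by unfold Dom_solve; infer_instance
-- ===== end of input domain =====

-- B replaces A's two interleaved summing recursions by one list-producing enumerator of the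
-- reached (product, sign) nodes plus flat summations over that table (objective: alternative).

-- ===== PORT A =====
-- the 'for i in range(pos,len(P))' loop of powerful, with accumulator total; break returns total
def powerfulGo (P : List Int) (N : Int) (p : Int) (prod : Int) (i : Int) (s : Int)
    (total : Int) : Int :=
  if h : i < (P.length : Int) then
    let prodd := prod * (PySem.List.pyGet? P i).getD 0
    let c := PySem.Int.floordiv N (prodd ^ p.toNat)
    if c < 1 then total
    else powerfulGo P N p prod (i + 1) s
           (total + (c * s + powerfulGo P N p prodd (i + 1) (s * (-1)) 0))
  else total
termination_by ((P.length : Int) + 1 - i).toNat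
decreasing_by
  all_goals simp_wf <;> omega

-- the loop of solve, with accumulator total
def solveGo (P : List Int) (N : Int) (p : Int) (prod : Int) (i : Int) (total : Int) : Int :=
  if h : i < (P.length : Int) then
    let prodd := prod * (PySem.List.pyGet? P i).getD 0
    let c := PySem.Int.floordiv N (prodd ^ p.toNat)
    if c < 1 then total
    else solveGo P N p prod (i + 1)
           (total + ((c - powerfulGo P c p 1 0 1 0) + solveGo P N p prodd (i + 1) 0))
  else total
termination_by ((P.length : Int) + 1 - i).toNat
decreasing_by
  all_goals simp_wf <;> omega

def solve (P : List Int) (N : Int) (p : Int) (prod : Int) (pos : Int) : Int :=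
  solveGo P N p prod pos 0

-- ===== PORT B =====
-- _nodes of Source B: the list of (product, sign) nodes of the pruned subset tree, visiting order
def nodesB (P : List Int) (M : Int) (p : Int) (prod : Int) (i : Int) (sign : Int) :
    List (Int × Int) :=
  if h : i < (P.length : Int) then
    let d := prod * (PySem.List.pyGet? P i).getD 0
    if PySem.Int.floordiv M (d ^ p.toNat) < 1 then []
    else (d, sign) :: (nodesB P M p d (i + 1) (-sign) ++ nodesB P M p prod (i + 1) sign)
  else []
termination_by ((P.length : Int) + 1 - i).toNat
decreasing_by
  all_goals simp_wf <;> omega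

def solve_alt (P : List Int) (N : Int) (p : Int) (prod : Int) (pos : Int) : Int :=
  (nodesB P N p prod pos 1).foldl
    (fun total x =>
      let c := PySem.Int.floordiv N (x.1 ^ p.toNat)
      let inner := nodesB P c p 1 0 1
      total + (c - inner.foldl (fun a y => a + y.2 * PySem.Int.floordiv c (y.1 ^ p.toNat)) 0))
    0

-- ===== PRECONDITION & SPEC =====
-- Pre_ excludes (beyond pos ≥ len(P), where the loop is empty and A returns 0): pos < -len(P)
-- (the first access P[pos] raises IndexError in both A and B); p < 0 (Python '**' then yields a
-- float and '//' a float result, not an int); and, when p ≥ 1, prod = 0 or 0 ∈ P — on most of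
-- those a zero product d makes N//(d**p) raise ZeroDivisionError; this last condition is slightly
-- conservative (an early break can keep A from ever reaching the zero, and A then returns a
-- value B matches).
def Pre_solve (P : List Int) (N : Int) (p : Int) (prod : Int) (pos : Int) : Prop :=
  -(P.length : Int) ≤ pos ∧
    ((P.length : Int) ≤ pos ∨ (0 ≤ p ∧ (p = 0 ∨ (prod ≠ 0 ∧ (0 : Int) ∉ P))))
instance (P : List Int) (N : Int) (p : Int) (prod : Int) (pos : Int) :
    Decidable (Pre_solve P N p prod pos) := by unfold Pre_solve; infer_instance

def pvWitness_solve : List Int × Int × Int × Int × Int := ([2, 3, 5], 100, 2, 1, 0)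

def Spec_solve (P : List Int) (N : Int) (p : Int) (prod : Int) (pos : Int) (out : Int) : Prop := out = solve_alt P N p prod pos
instance (P : List Int) (N : Int) (p : Int) (prod : Int) (pos : Int) (out : Int) : Decidable (Spec_solve P N p prod pos out) := by unfold Spec_solve; infer_instance

-- ===== CLAIM (what is proved, stated in full; the proofs are below) =====
def Claim_equal_solve : Prop := ∀ (P : List Int) (N : Int) (p : Int) (prod : Int) (pos : Int), Dom_solve P N p prod pos → Pre_solve P N p prod pos → Spec_solve P N p prod pos (solve P N p prod pos)

-- ===== LEMMAS AND PROOFS =====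

-- the signed sum B takes over a node table
def pfSum (N p : Int) (l : List (Int × Int)) : Int :=
  l.foldl (fun a y => a + y.2 * PySem.Int.floordiv N (y.1 ^ p.toNat)) 0

theorem foldl_shift {α : Type} (g : α → Int) (l : List α) :
    ∀ (a : Int), List.foldl (fun acc x => acc + g x) a l = a + List.foldl (fun acc x => acc + g x) 0 l := by
  induction l with
  | nil => intro a; simp
  | cons x xs ih =>
      intro a
      simp only [List.foldl_cons]
      rw [ih (a + g x), ih (0 + g x)]
      ring

theorem foldl_eq_map_sum {α : Type} (g : α → Int) (l : List α) :
    ∀ a : Int, List.foldl (fun acc x => acc + g x) a l = a + (l.map g).sum := by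
  induction l with
  | nil => intro a; simp
  | cons x xs ih => intro a; simp only [List.foldl_cons, List.map_cons, List.sum_cons, ih]; ring

theorem pfSum_cons (N p : Int) (d s : Int) (l : List (Int × Int)) :
    pfSum N p ((d, s) :: l) = s * PySem.Int.floordiv N (d ^ p.toNat) + pfSum N p l := by
  simp only [pfSum, List.foldl_cons]
  rw [foldl_shift (g := fun y : Int × Int => y.2 * PySem.Int.floordiv N (y.1 ^ p.toNat))]
  ring_nf

theorem pfSum_append (N p : Int) (l₁ l₂ : List (Int × Int)) :
    pfSum N p (l₁ ++ l₂) = pfSum N p l₁ + pfSum N p l₂ := by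
  simp only [pfSum, List.foldl_append]
  rw [foldl_shift (g := fun y : Int × Int => y.2 * PySem.Int.floordiv N (y.1 ^ p.toNat))]

theorem powGo_fuel (fuel : Nat) : ∀ (P : List Int) (N p prod i s total : Int),
    ((P.length : Int) + 1 - i).toNat ≤ fuel →
    powerfulGo P N p prod i s total = total + pfSum N p (nodesB P N p prod i s) := by
  induction fuel with
  | zero =>
      intro P N p prod i s total hle
      rw [powerfulGo, nodesB]
      have : ¬ i < (P.length : Int) := by omega
      simp [this, pfSum]
  | succ k ih =>
      intro P N p prod i s total hle
      rw [powerfulGo, nodesB]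
      by_cases h : i < (P.length : Int)
      · simp only [h, dif_pos]
        by_cases hc : PySem.Int.floordiv N ((prod * (PySem.List.pyGet? P i).getD 0) ^ p.toNat) < 1
        · simp [hc, pfSum]
        · simp only [hc, if_false]
          rw [ih P N p prod (i + 1) s _ (by omega),
              ih P N p (prod * (PySem.List.pyGet? P i).getD 0) (i + 1) (s * (-1)) 0 (by omega)]
          have hsg : s * (-1) = -s := by ring
          rw [hsg, pfSum_cons, pfSum_append]
          ring
      · have : ¬ i < (P.length : Int) := h
        simp [this, pfSum]

theorem powGo_eq (P : List Int) (N p prod i s total : Int) :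
    powerfulGo P N p prod i s total = total + pfSum N p (nodesB P N p prod i s) :=
  powGo_fuel (((P.length : Int) + 1 - i).toNat) P N p prod i s total le_rfl

theorem solveGo_fuel (fuel : Nat) : ∀ (P : List Int) (N p prod i total s : Int),
    ((P.length : Int) + 1 - i).toNat ≤ fuel →
    solveGo P N p prod i total = total + List.foldl
      (fun a x => a + (PySem.Int.floordiv N (x.1 ^ p.toNat) -
        pfSum (PySem.Int.floordiv N (x.1 ^ p.toNat)) p
          (nodesB P (PySem.Int.floordiv N (x.1 ^ p.toNat)) p 1 0 1)))
      0 (nodesB P N p prod i s) := by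
  induction fuel with
  | zero =>
      intro P N p prod i total s hle
      rw [solveGo, nodesB]
      have : ¬ i < (P.length : Int) := by omega
      simp [this]
  | succ k ih =>
      intro P N p prod i total s hle
      rw [solveGo, nodesB]
      by_cases h : i < (P.length : Int)
      · simp only [h, dif_pos]
        by_cases hc : PySem.Int.floordiv N ((prod * (PySem.List.pyGet? P i).getD 0) ^ p.toNat) < 1
        · simp [hc]
        · simp only [hc, if_false]
          rw [ih P N p prod (i + 1) _ s (by omega),
              ih P N p (prod * (PySem.List.pyGet? P i).getD 0) (i + 1) 0 (-s) (by omega),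
              powGo_eq]
          simp only [foldl_eq_map_sum, List.map_cons, List.map_append, List.sum_cons,
            List.sum_append]
          ring
      · have : ¬ i < (P.length : Int) := h
        simp [this]

-- ===== VERDICT (by name: the statement is the Claim_ definition above) =====
theorem solve_spec : Claim_equal_solve := by
  intro P N p prod pos _ _
  show solve P N p prod pos = solve_alt P N p prod pos
  rw [solve, solveGo_fuel (((P.length : Int) + 1 - pos).toNat) P N p prod pos 0 1 le_rfl]
  simp only [solve_alt, pfSum, zero_add]
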